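-- pv_equiv track=rewrite | github.com/CryptoYogiLLC/aiforce-discovery-agent | platform/processor/src/modules/connection_extractor.py | _redact_params
-- ===== SOURCE A (Python) =====
-- def _redact_params(params: str) -> str:
--     """Redact sensitive parameters from query string."""
--     if not params:
--         return ""
--
--     sensitive_keys = ["password", "pwd", "secret", "token", "key", "credential"]
--     redacted_parts = []
--
--     for part in params.split("&"):
--         if "=" in part:
--             key, value = part.split("=", 1)
--             if any(s in key.lower() for s in sensitive_keys):
--                 redacted_parts.append(f"{key}=[REDACTED]")
--             else:
--                 redacted_parts.append(part)
--         else: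
--             redacted_parts.append(part)
--
--     return "&".join(redacted_parts)
-- ===== SOURCE B (Python) =====
-- def _redact_params(params: str) -> str:
--     """Redact sensitive parameters from query string (single-pass state machine)."""
--     sensitive_keys = ["password", "pwd", "secret", "token", "key", "credential"]
--     out = []
--     key = []
--     in_value = False
--     redacting = False
--     for ch in params:
--         if ch == "&":
--             out.append("&")
--             key = []
--             in_value = False
--             redacting = False
--         elif ch == "=" and not in_value:
--             in_value = True
--             k = "".join(key).lower()
--             redacting = any(s in k for s in sensitive_keys)
--             out.append("=")
--             if redacting:
--                 out.append("[REDACTED]")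
--         elif not in_value:
--             key.append(ch)
--             out.append(ch)
--         elif not redacting:
--             out.append(ch)
--     return "".join(out)
-- ===== Notes on version B (the rewrite author's own statement) =====
-- stated objective: alternative
-- what changed: Replaced the split-into-parts / per-part key-value split / rejoin pipeline with a single character-level state machine that emits the redacted string in one pass, tracking the current key and a redacting flag.
import Mathlib
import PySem

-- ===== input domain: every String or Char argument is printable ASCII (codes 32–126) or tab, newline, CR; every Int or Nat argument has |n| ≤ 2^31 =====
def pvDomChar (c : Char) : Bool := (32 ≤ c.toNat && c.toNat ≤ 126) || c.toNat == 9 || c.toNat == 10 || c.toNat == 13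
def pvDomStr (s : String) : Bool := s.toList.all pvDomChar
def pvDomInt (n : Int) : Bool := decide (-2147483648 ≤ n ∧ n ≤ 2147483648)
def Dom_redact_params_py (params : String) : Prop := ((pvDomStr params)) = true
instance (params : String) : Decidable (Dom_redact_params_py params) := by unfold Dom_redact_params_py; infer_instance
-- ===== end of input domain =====

-- B replaces split/loop/rejoin by a one-pass character state machine; objective: alternative (same cost, different traversal).

-- ===== PORT A =====
def pvSensitiveKeys : List (List Char) :=
  ["password".toList, "pwd".toList, "secret".toList, "token".toList, "key".toList, "credential".toList]

def pvSens (key : List Char) : Bool :=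
  pvSensitiveKeys.any (fun s => PySem.Chars.isIn s (PySem.Chars.lower key))

-- one iteration of A's loop body (per part of params.split("&"))
def pvRedactPart (part : List Char) : List Char :=
  if PySem.Chars.isIn ['='] part then
    -- key, value = part.split("=", 1); value is not used by A's branches
    let key := (PySem.Chars.splitOnMax part ['='] 1).headD []
    if pvSens key then key ++ "=[REDACTED]".toList
    else part
  else part

def redact_params_py (params : String) : String :=
  if params = "" then "" else
  String.mk (PySem.Chars.join ['&']
    ((PySem.Chars.splitOn params.toList ['&']).map pvRedactPart))

-- ===== PORT B =====
-- state: (out, key, in_value, redacting)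
def pvStep (st : List Char × List Char × Bool × Bool) (ch : Char) :
    List Char × List Char × Bool × Bool :=
  let (out, key, inValue, redacting) := st
  if ch = '&' then (out ++ ['&'], [], false, false)
  else if ch = '=' && !inValue then
    let red := pvSens key
    (out ++ ['='] ++ (if red then "[REDACTED]".toList else []), key, true, red)
  else if !inValue then (out ++ [ch], key ++ [ch], inValue, redacting)
  else if !redacting then (out ++ [ch], key, inValue, redacting)
  else (out, key, inValue, redacting)

def redact_params_py_alt (params : String) : String :=
  String.mk (params.toList.foldl pvStep ([], [], false, false)).1

-- ===== PRECONDITION & SPEC =====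
def Spec_redact_params_py (params : String) (out : String) : Prop := out = redact_params_py_alt params
instance (params : String) (out : String) : Decidable (Spec_redact_params_py params out) := by unfold Spec_redact_params_py; infer_instance

-- ===== CLAIM (what is proved, stated in full; the proofs are below) =====
def Claim_equal_redact_params_py : Prop := ∀ (params : String), Dom_redact_params_py params → Spec_redact_params_py params (redact_params_py params)

-- ===== LEMMAS AND PROOFS =====

-- spec-side split of the whole string on '&' (pre = chars of the current part so far)
def pvParts (pre : List Char) : List Char → List (List Char)
  | [] => [pre]
  | c :: rest => if c = '&' then pre :: pvParts [] rest else pvParts (pre ++ [c]) rest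

-- spec-side processing of one '&'-free part, given the key accumulated so far
def pvEmit (key : List Char) : List Char → List Char
  | [] => []
  | c :: rest =>
    if c = '=' then '=' :: (if pvSens key then "[REDACTED]".toList else rest)
    else c :: pvEmit (key ++ [c]) rest

-- spec-side rendering of B's machine on the remaining input (key phase / value phase)
mutual
def pvTail (key : List Char) : List Char → List Char
  | [] => []
  | c :: rest =>
    if c = '&' then '&' :: pvTail [] rest
    else if c = '=' then
      '=' :: (if pvSens key then "[REDACTED]".toList else []) ++ pvVal (pvSens key) rest
    else c :: pvTail (key ++ [c]) rest
def pvVal (red : Bool) : List Char → List Char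
  | [] => []
  | c :: rest =>
    if c = '&' then '&' :: pvTail [] rest
    else if red then pvVal red rest
    else c :: pvVal red rest
end

theorem foldl_pvStep_spec (cs : List Char) :
    (∀ out key, (cs.foldl pvStep (out, key, false, false)).1 = out ++ pvTail key cs) ∧
    (∀ out key red, (cs.foldl pvStep (out, key, true, red)).1 = out ++ pvVal red cs) := by
  induction cs with
  | nil => simp [pvTail, pvVal]
  | cons c rest ih =>
    constructor
    · intro out key
      by_cases hc : c = '&'
      · subst hc; simp [pvStep, pvTail, ih.1]
      · by_cases he : c = '='
        · subst he; simp [pvStep, pvTail, hc, ih.2]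
        · simp [pvStep, pvTail, hc, he, ih.1]
    · intro out key red
      by_cases hc : c = '&'
      · subst hc; simp [pvStep, pvVal, ih.1]
      · cases red with
        | false => simp [pvStep, pvVal, hc, ih.2]
        | true => simp [pvStep, pvVal, hc, ih.2]

theorem splitOn_go_amp (fuel : Nat) :
    ∀ (l cur : List Char) (accs : List (List Char)), l.length < fuel →
      PySem.Chars.splitOn.go ['&'] fuel l cur accs = accs.reverse ++ pvParts cur.reverse l := by
  induction fuel with
  | zero => intro l cur accs h; omega
  | succ fuel ih =>
    intro l cur accs h
    cases l with
    | nil => simp [PySem.Chars.splitOn.go, pvParts]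
    | cons c rest =>
      by_cases hc : c = '&'
      · subst hc
        rw [PySem.Chars.splitOn.go]
        simp only [List.isPrefixOf, BEq.rfl, Bool.true_and, if_true, List.length_cons,
          List.drop_succ_cons, List.drop_zero, List.length_nil]
        rw [ih rest [] (cur.reverse :: accs) (by simp at h ⊢; omega)]
        simp [pvParts]
      · rw [PySem.Chars.splitOn.go]
        have : (['&'].isPrefixOf (c :: rest)) = false := by
          simp [List.isPrefixOf]; exact fun hh => absurd hh.symm hc
        rw [this]
        simp only [Bool.false_eq_true, if_false]
        rw [ih rest (c :: cur) accs (by simp at h ⊢; omega)]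
        simp [pvParts, hc]

theorem splitOnMax_go_zero (fuel : Nat) (l cur : List Char) (acc : List (List Char)) :
    PySem.Chars.splitOnMax.go ['='] fuel 0 l cur acc = ((cur.reverse ++ l) :: acc).reverse := by
  cases fuel with
  | zero => rw [PySem.Chars.splitOnMax.go]
  | succ fuel =>
    cases l with
    | nil => rw [PySem.Chars.splitOnMax.go] <;> first | omega | simp
    | cons c rest => rw [PySem.Chars.splitOnMax.go]; simp

theorem splitOnMax_go_one (fuel : Nat) :
    ∀ (l cur : List Char) (acc : List (List Char)), l.length < fuel →
      PySem.Chars.splitOnMax.go ['='] fuel 1 l cur acc =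
        acc.reverse ++ (if '=' ∈ l then
          [cur.reverse ++ l.takeWhile (· ≠ '='), (l.dropWhile (· ≠ '=')).tail]
        else [cur.reverse ++ l]) := by
  induction fuel with
  | zero => intro l cur acc h; omega
  | succ fuel ih =>
    intro l cur acc h
    cases l with
    | nil => rw [PySem.Chars.splitOnMax.go] <;> first | omega | simp
    | cons c rest =>
      by_cases hc : c = '='
      · subst hc
        rw [PySem.Chars.splitOnMax.go]
        simp only [List.isPrefixOf, BEq.rfl, Bool.true_and, if_true, List.drop_succ_cons]
        rw [splitOnMax_go_zero]
        simp [List.takeWhile, List.dropWhile]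
      · rw [PySem.Chars.splitOnMax.go]
        have hp : (['='].isPrefixOf (c :: rest)) = false := by
          simp [List.isPrefixOf]; exact fun hh => absurd hh.symm hc
        rw [hp]
        simp only [if_false, Bool.false_eq_true]
        rw [ih rest (c :: cur) acc (by simp at h ⊢; omega)]
        simp [List.takeWhile, List.dropWhile, hc, Ne.symm hc]

theorem pvEmit_closed (part : List Char) :
    ∀ key, pvEmit key part =
      if '=' ∈ part then
        part.takeWhile (· ≠ '=') ++
          '=' :: (if pvSens (key ++ part.takeWhile (· ≠ '=')) then "[REDACTED]".toList
                  else (part.dropWhile (· ≠ '=')).tail)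
      else part := by
  induction part with
  | nil => intro key; simp [pvEmit]
  | cons c rest ih =>
    intro key
    by_cases hc : c = '='
    · subst hc
      by_cases hs : pvSens key <;> simp [pvEmit, hs]
    · have h2 : ('=':Char) ≠ c := Ne.symm hc
      by_cases hm : '=' ∈ rest
      · simp [pvEmit, hc, ih, hm, h2, List.append_assoc]
      · simp [pvEmit, hc, ih, hm, h2]

theorem eq_takeWhile_dropWhile_eq : ∀ (part : List Char), '=' ∈ part →
    part = part.takeWhile (· ≠ '=') ++ '=' :: (part.dropWhile (· ≠ '=')).tail := by
  intro part
  induction part with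
  | nil => intro h; simp at h
  | cons c rest ih =>
    intro hm
    by_cases hc : c = '='
    · subst hc; simp
    · have hr : '=' ∈ rest := by
        cases hm with
        | head => exact absurd rfl hc
        | tail _ hh => exact hh
      simp only [ne_eq, decide_not] at ih ⊢
      simp [hc]
      exact ih hr

theorem pvRedactPart_eq_pvEmit (part : List Char) : pvRedactPart part = pvEmit [] part := by
  by_cases hm : '=' ∈ part
  · have hin : PySem.Chars.isIn ['='] part = true := by
      rw [PySem.Chars.isIn_iff_infix]; exact (List.singleton_infix_iff '=' part).2 hm
    have hk : (PySem.Chars.splitOnMax part ['='] 1).headD [] = part.takeWhile (· ≠ '=') := by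
      rw [PySem.Chars.splitOnMax, if_neg (by norm_num : ¬(1 : Int) < 0),
        show ((1 : Int).toNat) = 1 from rfl,
        splitOnMax_go_one (part.length + 1) part [] [] (by omega), if_pos hm]
      simp
    simp only [pvRedactPart, hin, if_true, hk]
    rw [pvEmit_closed part [], if_pos hm]
    by_cases hs : pvSens (part.takeWhile (· ≠ '=')) <;>
      simp only [ne_eq, decide_not] at hs ⊢ <;> simp [hs]
    simpa using eq_takeWhile_dropWhile_eq part hm
  · have hin : PySem.Chars.isIn ['='] part = false := by
      rw [PySem.Chars.isIn_eq_false_iff]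
      exact fun hinf => hm ((List.singleton_infix_iff '=' part).1 hinf)
    rw [pvRedactPart, if_neg (by simp [hin]), pvEmit_closed part [], if_neg hm]

theorem pvParts_closed (cs : List Char) : ∀ pre,
    pvParts pre cs =
      if '&' ∈ cs then (pre ++ cs.takeWhile (· ≠ '&')) :: pvParts [] ((cs.dropWhile (· ≠ '&')).tail)
      else [pre ++ cs] := by
  induction cs with
  | nil => intro pre; simp [pvParts]
  | cons c rest ih =>
    intro pre
    by_cases hc : c = '&'
    · subst hc; simp [pvParts]
    · have h2 : ('&':Char) ≠ c := Ne.symm hc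
      by_cases hm : '&' ∈ rest
      · simp [pvParts, hc, ih, hm, h2, List.append_assoc]
      · simp [pvParts, hc, ih, hm, h2]

theorem pvTail_closed (cs : List Char) :
    (∀ key, pvTail key cs = pvEmit key (cs.takeWhile (· ≠ '&')) ++
      (if '&' ∈ cs then '&' :: pvTail [] ((cs.dropWhile (· ≠ '&')).tail) else [])) ∧
    (∀ red, pvVal red cs = (if red then [] else cs.takeWhile (· ≠ '&')) ++
      (if '&' ∈ cs then '&' :: pvTail [] ((cs.dropWhile (· ≠ '&')).tail) else [])) := by
  induction cs with
  | nil =>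
    constructor
    · intro key; simp [pvTail, pvEmit]
    · intro red; cases red <;> simp [pvVal]
  | cons c rest ih =>
    constructor
    · intro key
      by_cases hc : c = '&'
      · subst hc; simp [pvTail, pvEmit]
      · have h2 : ('&':Char) ≠ c := Ne.symm hc
        by_cases he : c = '='
        · subst he
          by_cases hs : pvSens key <;> by_cases hm : '&' ∈ rest <;>
            simp [pvTail, pvEmit, ih.2, hs, hm, h2]
        · by_cases hm : '&' ∈ rest <;> simp [pvTail, pvEmit, hc, he, ih.1, hm, h2]
    · intro red
      by_cases hc : c = '&'
      · subst hc; cases red <;> simp [pvVal]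
      · have h2 : ('&':Char) ≠ c := Ne.symm hc
        cases red <;> by_cases hm : '&' ∈ rest <;> simp [pvVal, hc, ih.2, hm, h2]


theorem takeWhile_amp_of_not_mem (cs : List Char) (h : '&' ∉ cs) :
    cs.takeWhile (· ≠ '&') = cs := by
  induction cs with
  | nil => rfl
  | cons c r ih =>
    simp at h
    have hc : c ≠ '&' := fun hh => h.1 hh.symm
    simp [hc]
    exact fun x hx hxeq => h.2 (hxeq ▸ hx)

theorem dropWhile_amp_tail_length_lt (cs : List Char) (h : '&' ∈ cs) :
    ((cs.dropWhile (· ≠ '&')).tail).length < cs.length := by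
  induction cs with
  | nil => simp at h
  | cons c r ih =>
    by_cases hc : c = '&'
    · rw [List.dropWhile_cons, if_neg (by simp [hc])]
      simp
    · have hr : '&' ∈ r := by
        cases h with
        | head => exact absurd rfl hc
        | tail _ hh => exact hh
      have := ih hr
      rw [List.dropWhile_cons, if_pos (by simp [hc])]
      simp only [List.length_cons]
      omega

theorem pvParts_ne_nil (cs : List Char) : ∀ pre, pvParts pre cs ≠ [] := by
  induction cs with
  | nil => intro pre; simp [pvParts]
  | cons c rest ih =>
    intro pre
    by_cases hc : c = '&'
    · simp [pvParts, hc]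
    · rw [pvParts, if_neg hc]; exact ih (pre ++ [c])

theorem main_eq (n : Nat) : ∀ (cs : List Char), cs.length ≤ n →
    PySem.Chars.join ['&'] ((pvParts [] cs).map pvRedactPart) = pvTail [] cs := by
  induction n with
  | zero =>
    intro cs h
    have : cs = [] := List.eq_nil_of_length_eq_zero (by omega)
    subst this
    simp only [pvParts, List.map_cons, List.map_nil, PySem.Chars.join_singleton, pvTail]
    decide
  | succ n ih =>
    intro cs h
    by_cases hm : '&' ∈ cs
    · rw [pvParts_closed cs [], if_pos hm, (pvTail_closed cs).1 [], if_pos hm]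
      have hlt := dropWhile_amp_tail_length_lt cs hm
      rcases hne : pvParts [] ((cs.dropWhile (· ≠ '&')).tail) with _ | ⟨p, ps⟩
      · exact absurd hne (pvParts_ne_nil _ [])
      · rw [List.map_cons, List.map_cons, PySem.Chars.join_cons_cons, ← List.map_cons, ← hne,
          ih ((cs.dropWhile (· ≠ '&')).tail) (by omega), pvRedactPart_eq_pvEmit]
        simp
    · rw [pvParts_closed cs [], if_neg hm, (pvTail_closed cs).1 [], if_neg hm,
        takeWhile_amp_of_not_mem cs hm]
      simp [PySem.Chars.join_singleton, pvRedactPart_eq_pvEmit]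

-- ===== VERDICT (by name: the statement is the Claim_ definition above) =====
theorem redact_params_py_spec : Claim_equal_redact_params_py := by
  intro params _
  unfold Spec_redact_params_py redact_params_py redact_params_py_alt
  rw [(foldl_pvStep_spec params.toList).1 [] []]
  by_cases h : params = ""
  · subst h; decide
  · rw [if_neg h, PySem.Chars.splitOn,
      splitOn_go_amp (params.toList.length + 1) params.toList [] [] (by omega)]
    rw [show ([] : List (List Char)).reverse ++ pvParts [].reverse params.toList
        = pvParts [] params.toList by simp]
    rw [main_eq params.toList.length params.toList le_rfl]
    simp
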